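-- pv_equiv track=rewrite | github.com/ariqamin/HokieSync | providers/vt_catalog.py | _subject_hint_from_code
-- ===== SOURCE A (Python) =====
-- def _subject_hint_from_code(course_code: str) -> str:
--     letters = []
--     for char in str(course_code):
--         if char.isalpha():
--             letters.append(char)
--         elif letters:
--             break
--     return "".join(letters) or "CS"
-- ===== SOURCE B (Python) =====
-- def _subject_hint_from_code(course_code: str) -> str:
--     s = str(course_code)
--     words = "".join(c if c.isalpha() else " " for c in s).split()
--     return words[0] if words else "CS"
-- ===== Notes on version B (the rewrite author's own statement) =====
-- stated objective: alternative
-- what changed: Instead of an accumulator loop with an early break, B masks every non-letter character to a space, lets str.split() produce the list of maximal letter runs, and returns the first run (or 'CS' if there is none).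
import Mathlib
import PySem

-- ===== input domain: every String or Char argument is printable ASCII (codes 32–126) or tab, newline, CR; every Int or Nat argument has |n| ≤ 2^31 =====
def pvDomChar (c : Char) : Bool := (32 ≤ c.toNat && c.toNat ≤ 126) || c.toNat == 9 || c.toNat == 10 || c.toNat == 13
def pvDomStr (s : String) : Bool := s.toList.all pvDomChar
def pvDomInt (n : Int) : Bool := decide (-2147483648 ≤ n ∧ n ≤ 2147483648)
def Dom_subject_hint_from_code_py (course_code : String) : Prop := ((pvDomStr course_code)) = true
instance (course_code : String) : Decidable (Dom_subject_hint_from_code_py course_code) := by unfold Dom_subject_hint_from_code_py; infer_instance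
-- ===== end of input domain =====

-- B masks non-letters to spaces and takes the first word of str.split() (alternative algorithm, same cost).

-- ===== PORT A =====
-- the for-loop with early break, carrying the `letters` accumulator
def pvLoopA : List Char → List Char → List Char
  | [], letters => letters
  | c :: cs, letters =>
    if PySem.Chars.isalpha c then pvLoopA cs (letters ++ [c])
    else if letters ≠ [] then letters
    else pvLoopA cs letters

def subject_hint_from_code_py (course_code : String) : String :=
  let letters := pvLoopA course_code.toList []
  if String.ofList letters = "" then "CS" else String.ofList letters

-- ===== PORT B =====
def subject_hint_from_code_py_alt (course_code : String) : String :=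
  let masked := String.ofList (course_code.toList.map
      (fun c => if PySem.Chars.isalpha c then c else ' '))
  let words := PySem.Str.split₀ masked
  match words with
  | w :: _ => w
  | [] => "CS"

-- ===== PRECONDITION & SPEC =====
def Spec_subject_hint_from_code_py (course_code : String) (out : String) : Prop := out = subject_hint_from_code_py_alt course_code
instance (course_code : String) (out : String) : Decidable (Spec_subject_hint_from_code_py course_code out) := by unfold Spec_subject_hint_from_code_py; infer_instance

-- ===== CLAIM (what is proved, stated in full; the proofs are below) =====
def Claim_equal_subject_hint_from_code_py : Prop := ∀ (course_code : String), Dom_subject_hint_from_code_py course_code → Spec_subject_hint_from_code_py course_code (subject_hint_from_code_py course_code)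

-- ===== LEMMAS AND PROOFS =====

-- A's loop characterised as the first maximal alphabetic run
theorem pvLoopA_ne_nil (l acc : List Char) (h : acc ≠ []) :
    pvLoopA l acc = acc ++ l.takeWhile (fun c => PySem.Chars.isalpha c) := by
  induction l generalizing acc with
  | nil => simp [pvLoopA]
  | cons c cs ih =>
    by_cases hc : PySem.Chars.isalpha c
    · simp [pvLoopA, hc, ih (acc ++ [c]) (by simp), List.takeWhile]
    · simp [pvLoopA, hc, h, List.takeWhile]

theorem pvLoopA_nil (l : List Char) :
    pvLoopA l [] = (l.dropWhile (fun c => !PySem.Chars.isalpha c)).takeWhile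
      (fun c => PySem.Chars.isalpha c) := by
  induction l with
  | nil => simp [pvLoopA]
  | cons c cs ih =>
    by_cases hc : PySem.Chars.isalpha c
    · simp [pvLoopA, hc, pvLoopA_ne_nil cs [c] (by simp), List.dropWhile]
    · simp [pvLoopA, hc, ih, List.dropWhile]

-- letters are never whitespace
theorem pv_alpha_not_space (c : Char) (h : PySem.Chars.isalpha c = true) :
    PySem.Chars.isspace c = false := by
  simp only [PySem.Chars.isalpha, PySem.Chars.isupper, PySem.Chars.islower, Bool.or_eq_true,
    Bool.and_eq_true, decide_eq_true_eq, Char.le_def, Char.reduceVal,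
    UInt32.le_iff_toNat_le, UInt32.reduceToNat] at h
  simp only [PySem.Chars.isspace, Bool.or_eq_false_iff, Bool.and_eq_false_iff,
    decide_eq_false_iff_not, not_le, Char.toNat]
  rcases h with ⟨h1, h2⟩ | ⟨h1, h2⟩ <;> omega

-- split₀.go's accumulator peels off
theorem pv_go_acc (l cur acc) :
    PySem.Chars.split₀.go l cur acc = acc.reverse ++ PySem.Chars.split₀.go l cur [] := by
  induction l generalizing cur acc with
  | nil =>
    by_cases hc : cur.isEmpty <;> simp [PySem.Chars.split₀.go, hc]
  | cons c cs ih =>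
    rw [PySem.Chars.split₀.go, PySem.Chars.split₀.go]
    split_ifs with hs hc
    · exact ih [] acc
    · rw [ih [] (cur.reverse :: acc), ih [] [cur.reverse]]
      simp
    · exact ih (c :: cur) acc

-- while inside a word, go extends cur with the non-space run
theorem pv_go_run (l cur) (h : cur ≠ []) :
    (PySem.Chars.split₀.go l cur []).head? =
      some (cur.reverse ++ l.takeWhile (fun c => !PySem.Chars.isspace c)) := by
  induction l generalizing cur with
  | nil => simp [PySem.Chars.split₀.go, h, List.isEmpty_iff]
  | cons c cs ih =>
    rw [PySem.Chars.split₀.go]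
    by_cases hs : PySem.Chars.isspace c = true
    · rw [if_pos hs, if_neg (by simp [List.isEmpty_iff, h])]
      rw [pv_go_acc]
      simp [List.takeWhile, hs]
    · rw [if_neg hs]
      rw [ih (c :: cur) (by simp)]
      simp [List.takeWhile, hs]

-- on a masked list the trailing run of non-spaces is the original letter run
theorem pv_mask_takeWhile (l : List Char) :
    ((l.map (fun c => if PySem.Chars.isalpha c then c else ' ')).takeWhile
        (fun c => !PySem.Chars.isspace c)) =
      l.takeWhile (fun c => PySem.Chars.isalpha c) := by
  induction l with
  | nil => simp
  | cons c cs ih =>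
    by_cases hc : PySem.Chars.isalpha c
    · simp [List.takeWhile, hc, pv_alpha_not_space c hc, ih]
    · have : PySem.Chars.isspace ' ' = true := by decide
      simp [List.takeWhile, hc, this]

-- the first word produced by split₀ on the masked list
theorem pv_split_head (l : List Char) :
    (PySem.Chars.split₀ (l.map (fun c => if PySem.Chars.isalpha c then c else ' '))).head? =
      if (l.dropWhile (fun c => !PySem.Chars.isalpha c)) = [] then none
      else some ((l.dropWhile (fun c => !PySem.Chars.isalpha c)).takeWhile
        (fun c => PySem.Chars.isalpha c)) := by
  induction l with
  | nil => simp [PySem.Chars.split₀, PySem.Chars.split₀.go]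
  | cons c cs ih =>
    by_cases hc : PySem.Chars.isalpha c
    · have hs := pv_alpha_not_space c hc
      unfold PySem.Chars.split₀
      rw [List.map_cons, if_pos hc, PySem.Chars.split₀.go,
        if_neg (by simp [hs])]
      rw [pv_go_run _ [c] (by simp)]
      simp [List.dropWhile, hc, pv_mask_takeWhile]
    · have hs : PySem.Chars.isspace ' ' = true := by decide
      unfold PySem.Chars.split₀ at *
      rw [List.map_cons, if_neg hc, PySem.Chars.split₀.go, if_pos hs,
        if_pos (by simp)]
      rw [ih]
      simp [List.dropWhile, hc]

-- ===== VERDICT (by name: the statement is the Claim_ definition above) =====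
theorem subject_hint_from_code_py_spec : Claim_equal_subject_hint_from_code_py := by
  intro s _
  unfold Spec_subject_hint_from_code_py subject_hint_from_code_py subject_hint_from_code_py_alt
  simp only [pvLoopA_nil]
  have hmask : (String.ofList (s.toList.map
      (fun c => if PySem.Chars.isalpha c then c else ' '))).toList =
      s.toList.map (fun c => if PySem.Chars.isalpha c then c else ' ') := String.toList_ofList
  have hw := PySem.Str.split₀_map_toList (String.ofList (s.toList.map
      (fun c => if PySem.Chars.isalpha c then c else ' ')))
  rw [hmask] at hw
  replace hw := congrArg List.head? hw
  rw [pv_split_head, List.head?_map] at hw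
  by_cases hd : s.toList.dropWhile (fun c => !PySem.Chars.isalpha c) = []
  · -- no letter anywhere: A returns "CS", B's word list is empty
    rw [if_pos hd] at hw
    have hW : PySem.Str.split₀ (String.ofList (s.toList.map
        (fun c => if PySem.Chars.isalpha c then c else ' '))) = [] := by
      cases hws : PySem.Str.split₀ (String.ofList (s.toList.map
          (fun c => if PySem.Chars.isalpha c then c else ' '))) with
      | nil => rfl
      | cons w ws => rw [hws] at hw; simp at hw
    rw [hd, hW]
    simp
  · -- there is a letter: A's run is nonempty and equals B's first word
    rw [if_neg hd] at hw
    have hrun_ne : (s.toList.dropWhile (fun c => !PySem.Chars.isalpha c)).takeWhile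
        (fun c => PySem.Chars.isalpha c) ≠ [] := by
      have halpha := List.head_dropWhile_not (fun c => !PySem.Chars.isalpha c)
        (l := s.toList) hd
      cases hcons : s.toList.dropWhile (fun c => !PySem.Chars.isalpha c) with
      | nil => exact absurd hcons hd
      | cons c cs =>
        have hhead : (s.toList.dropWhile (fun c => !PySem.Chars.isalpha c)).head hd = c := by
          simp [hcons]
        rw [hhead] at halpha
        simp only [Bool.not_eq_eq_eq_not, Bool.not_false] at halpha
        simp [List.takeWhile, halpha]
    cases hws : PySem.Str.split₀ (String.ofList (s.toList.map
        (fun c => if PySem.Chars.isalpha c then c else ' '))) with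
    | nil => rw [hws] at hw; simp at hw
    | cons w ws =>
      rw [hws] at hw
      simp only [List.head?_cons, Option.map_some, Option.some.injEq] at hw
      have hne : String.ofList ((s.toList.dropWhile (fun c => !PySem.Chars.isalpha c)).takeWhile
          (fun c => PySem.Chars.isalpha c)) ≠ "" := by
        intro hcontra
        exact hrun_ne (by simpa using congrArg String.toList hcontra)
      rw [if_neg hne]
      rw [← String.ofList_toList (s := w), hw]
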